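-- pv_equiv track=rewrite | github.com/INNOVZ/zaakiy | app/utils/validators.py | sanitize_text_input
-- ===== SOURCE A (Python) =====
-- from typing import Any, Dict, Optional
--
-- def sanitize_text_input(text: str, max_length: Optional[int] = None) -> str:
--     """
--     Sanitize text input by removing potentially dangerous characters
--
--     Args:
--         text: Text to sanitize
--         max_length: Optional maximum length
--
--     Returns:
--         Sanitized text
--     """
--     if not text:
--         return ""
--
--     # Remove null bytes
--     text = text.replace("\x00", "")
--
--     # Remove control characters except newlines and tabs
--     text = "".join(
--         char for char in text if char == "\n" or char == "\t" or ord(char) >= 32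
--     )
--
--     # Trim if needed
--     if max_length and len(text) > max_length:
--         text = text[:max_length]
--
--     return text.strip()
-- ===== SOURCE B (Python) =====
-- _BAD_CODES = [c for c in range(32) if c not in (9, 10)]
--
--
-- def sanitize_text_input(text, max_length=None):
--     if not text:
--         return ""
--     cleaned = text
--     for code in _BAD_CODES:
--         cleaned = cleaned.replace(chr(code), "")
--     if max_length and len(cleaned) > max_length:
--         cleaned = cleaned[:max_length]
--     return cleaned.strip()
-- ===== Notes on version B (the rewrite author's own statement) =====
-- stated objective: faster
-- what changed: Replaces A's single per-character filtering pass (null-byte replace plus a conditional comprehension) by 30 staged whole-string deletion passes, one str.replace(chr(code), '') per forbidden control codepoint, which subsumes the null-byte removal; truncation and strip are kept.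
import Mathlib
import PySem

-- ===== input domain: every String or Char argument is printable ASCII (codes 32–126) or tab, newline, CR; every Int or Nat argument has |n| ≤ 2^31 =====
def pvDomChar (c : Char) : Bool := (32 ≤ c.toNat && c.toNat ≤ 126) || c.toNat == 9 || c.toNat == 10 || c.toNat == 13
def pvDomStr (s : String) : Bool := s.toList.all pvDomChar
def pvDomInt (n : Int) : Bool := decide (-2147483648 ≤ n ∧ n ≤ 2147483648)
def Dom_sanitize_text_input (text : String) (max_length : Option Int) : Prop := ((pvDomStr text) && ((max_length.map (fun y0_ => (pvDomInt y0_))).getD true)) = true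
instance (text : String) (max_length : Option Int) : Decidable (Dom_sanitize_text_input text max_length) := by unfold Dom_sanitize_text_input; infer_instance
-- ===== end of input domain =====

-- B replaces A's single per-char filtering pass by 30 staged whole-string deletion passes,
-- one replace(chr(code), "") per forbidden control codepoint (objective: alternative).

-- ===== PORT A =====
def sanitize_text_input (text : String) (max_length : Option Int) : String :=
  if text.toList = [] then "" else
  -- text = text.replace("\x00", "")
  let t1 := PySem.Chars.replace text.toList [Char.ofNat 0] []
  -- "".join(char for char in text if char == "\n" or char == "\t" or ord(char) >= 32)
  let t2 := t1.filter (fun ch => ch == '\n' || ch == '\t' || decide (32 ≤ ch.toNat))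
  -- if max_length and len(text) > max_length: text = text[:max_length]
  let t3 := match max_length with
    | none => t2
    | some m => if m ≠ 0 ∧ PySem.List.len t2 > m then PySem.List.slice t2 none (some m) else t2
  String.ofList (PySem.Chars.strip t3)

-- ===== PORT B =====
-- _BAD_CODES = [c for c in range(32) if c not in (9, 10)]
def pvBadCodes : List Int :=
  (PySem.List.pyRange 0 32 1).filter (fun c => !(c == (9 : Int) || c == (10 : Int)))

def sanitize_text_input_alt (text : String) (max_length : Option Int) : String :=
  if text.toList = [] then "" else
  -- for code in _BAD_CODES: cleaned = cleaned.replace(chr(code), "")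
  let cleaned := pvBadCodes.foldl
    (fun cs code => PySem.Chars.replace cs [Char.ofNat code.toNat] []) text.toList
  -- if max_length and len(cleaned) > max_length: cleaned = cleaned[:max_length]
  let t := match max_length with
    | none => cleaned
    | some m => if m ≠ 0 ∧ PySem.List.len cleaned > m then PySem.List.slice cleaned none (some m) else cleaned
  String.ofList (PySem.Chars.strip t)

-- ===== PRECONDITION & SPEC =====
def Spec_sanitize_text_input (text : String) (max_length : Option Int) (out : String) : Prop := out = sanitize_text_input_alt text max_length
instance (text : String) (max_length : Option Int) (out : String) : Decidable (Spec_sanitize_text_input text max_length out) := by unfold Spec_sanitize_text_input; infer_instance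

-- ===== CLAIM =====
def Claim_equal_sanitize_text_input : Prop := ∀ (text : String) (max_length : Option Int), Dom_sanitize_text_input text max_length → Spec_sanitize_text_input text max_length (sanitize_text_input text max_length)

-- ===== LEMMAS AND PROOFS =====

-- replace.go with a single-char pattern and empty replacement is a filter
theorem pv_go_filter (c : Char) (fuel : Nat) (l acc : List Char) (h : l.length ≤ fuel) :
    PySem.Chars.replace.go [c] [] fuel l acc = acc.reverse ++ l.filter (fun d => d != c) := by
  induction fuel generalizing l acc with
  | zero =>
    have : l = [] := List.length_eq_zero_iff.mp (Nat.le_zero.mp h)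
    subst this
    simp [PySem.Chars.replace.go]
  | succ n ih =>
    cases l with
    | nil => simp [PySem.Chars.replace.go]
    | cons d t =>
      have ht : t.length ≤ n := by simpa using h
      by_cases hd : d = c
      · subst hd
        have hpre : ([d].isPrefixOf (d :: t)) = true := by simp [List.isPrefixOf]
        rw [PySem.Chars.replace.go]
        simp only [hpre, if_pos]
        rw [ih ((d :: t).drop [d].length) ([].reverse ++ acc) (by simpa using ht)]
        simp [List.filter_cons]
      · have hpre : ¬ ([c].isPrefixOf (d :: t) = true) := by
          simp [List.isPrefixOf]; exact fun hco => (hd hco.symm).elim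
        rw [PySem.Chars.replace.go]
        simp only [hpre, if_false]
        rw [ih t (d :: acc) ht]
        simp [List.filter_cons, hd]

theorem pv_replace_single (c : Char) (cs : List Char) :
    PySem.Chars.replace cs [c] [] = cs.filter (fun d => d != c) := by
  rw [PySem.Chars.replace]
  simp [pv_go_filter c cs.length cs [] (le_refl _)]

-- the staged foldl of deletion passes is one filter with the conjunctive predicate
theorem pv_foldl_filter (L : List Int) (cs : List Char) :
    L.foldl (fun cs code => PySem.Chars.replace cs [Char.ofNat code.toNat] []) cs
      = cs.filter (fun ch => L.all (fun k => ch != Char.ofNat k.toNat)) := by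
  induction L generalizing cs with
  | nil => simp
  | cons k L ih =>
    rw [List.foldl_cons, ih, pv_replace_single, List.filter_filter]
    apply List.filter_congr
    intro ch _
    simp [List.all_cons, Bool.and_comm]

-- the concrete code list
theorem pv_codes : pvBadCodes =
    [(0 : Int), 1, 2, 3, 4, 5, 6, 7, 8, 11, 12, 13, 14, 15, 16, 17, 18, 19, 20, 21, 22, 23, 24, 25, 26, 27, 28, 29, 30, 31] := by
  decide

-- per-char: A's NUL-removal-then-filter predicate equals B's all-codes predicate
theorem pv_pred (ch : Char) :
    ((ch == '\n' || ch == '\t' || decide (32 ≤ ch.toNat)) && (ch != Char.ofNat 0))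
      = pvBadCodes.all (fun k => ch != Char.ofNat k.toNat) := by
  rw [pv_codes]
  by_cases h32 : 32 ≤ ch.toNat
  · have hr : ∀ k ∈ [(0 : Int), 1, 2, 3, 4, 5, 6, 7, 8, 11, 12, 13, 14, 15, 16, 17, 18, 19, 20, 21, 22, 23, 24, 25, 26, 27, 28, 29, 30, 31],
        (ch != Char.ofNat k.toNat) = true := by
      intro k hk
      fin_cases hk <;>
        · simp only [bne_iff_ne, ne_eq]
          intro hc
          rw [hc] at h32
          exact absurd h32 (by decide)
    rw [List.all_eq_true.mpr hr]
    have h0 : (ch != Char.ofNat 0) = true := hr 0 (by simp)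
    simp [h32, h0]
  · have hn : ch.toNat < 32 := by omega
    have hch : ch = Char.ofNat ch.toNat := (Char.ofNat_toNat ch).symm
    set n := ch.toNat with hndef
    rw [hch]
    interval_cases n <;> decide

-- ===== VERDICT =====
theorem sanitize_text_input_spec : Claim_equal_sanitize_text_input := by
  intro text max_length _
  unfold Spec_sanitize_text_input sanitize_text_input sanitize_text_input_alt
  by_cases hempty : text.toList = []
  · simp [hempty]
  · simp only [hempty, ite_false]
    have hclean :
        (PySem.Chars.replace text.toList [Char.ofNat 0] []).filter
            (fun ch => ch == '\n' || ch == '\t' || decide (32 ≤ ch.toNat))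
          = pvBadCodes.foldl
              (fun cs code => PySem.Chars.replace cs [Char.ofNat code.toNat] []) text.toList := by
      rw [pv_replace_single, pv_foldl_filter, List.filter_filter]
      exact List.filter_congr (fun ch _ => pv_pred ch)
    rw [hclean]
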